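-- pv_equiv track=rewrite | github.com/o2alexanderfedin/serena | src/serena/refactoring/multi_server.py | _split_name_path
-- ===== SOURCE A (Python) =====
-- def _split_name_path(name_path: str) -> list[str]:
--     """Split ``name_path`` on ``::`` (Rust) and ``.`` (Python) separators."""
--     if not name_path:
--         return []
--     pieces: list[str] = []
--     for cc in name_path.split("::"):
--         for dotted in cc.split("."):
--             if dotted:
--                 pieces.append(dotted)
--     return pieces
-- ===== SOURCE B (Python) =====
-- def _split_name_path(name_path: str) -> list[str]:
--     """Single left-to-right scan recognising '.' and '::' separators directly."""
--     pieces = []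
--     cur = []
--     i = 0
--     n = len(name_path)
--     while i < n:
--         c = name_path[i]
--         if c == '.':
--             if cur:
--                 pieces.append(''.join(cur))
--                 cur = []
--             i += 1
--         elif c == ':' and i + 1 < n and name_path[i + 1] == ':':
--             if cur:
--                 pieces.append(''.join(cur))
--                 cur = []
--             i += 2
--         else:
--             cur.append(c)
--             i += 1
--     if cur:
--         pieces.append(''.join(cur))
--     return pieces
-- ===== Notes on version B (the rewrite author's own statement) =====
-- stated objective: alternative
-- what changed: Replaced the two-level split (split on '::', then re-split every piece on '.') with a single left-to-right character scan that recognises both separators in one pass and flushes nonempty fragments as it goes.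
import Mathlib
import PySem

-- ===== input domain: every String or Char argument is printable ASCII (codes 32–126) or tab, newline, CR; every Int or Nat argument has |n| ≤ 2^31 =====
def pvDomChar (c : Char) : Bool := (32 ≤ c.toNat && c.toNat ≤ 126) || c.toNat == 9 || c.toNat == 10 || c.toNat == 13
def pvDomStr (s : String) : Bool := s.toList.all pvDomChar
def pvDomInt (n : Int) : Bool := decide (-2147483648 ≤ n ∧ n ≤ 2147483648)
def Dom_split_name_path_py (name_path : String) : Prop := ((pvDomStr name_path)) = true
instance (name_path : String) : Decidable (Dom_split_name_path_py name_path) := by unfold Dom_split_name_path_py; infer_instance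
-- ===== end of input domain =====

-- B replaces A's two-level split (on "::", then each piece on ".") by a single left-to-right
-- character scan recognising both separators in one pass; alternative decomposition, same cost.

-- ===== PORT A =====
-- A: if not name_path: return []; for cc in name_path.split("::"): for dotted in cc.split("."):
--    if dotted: pieces.append(dotted).  str.split(sep) is PySem.Chars.splitOn (the sep ≠ "" form).
def split_name_path_py (name_path : String) : List String :=
  if name_path = "" then []
  else
    (PySem.Chars.splitOn name_path.toList [':', ':']).foldl
      (fun pieces cc =>
        (PySem.Chars.splitOn cc ['.']).foldl
          (fun pieces dotted =>
            if dotted.isEmpty then pieces else pieces ++ [String.ofList dotted])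
          pieces)
      []

-- ===== PORT B =====
-- Source B's while loop: `cur` is the fragment being built (python's ''.join(cur));
-- '.' and ':'+':' flush, anything else is appended to cur; a trailing fragment is flushed at the end.
def pvScan : List Char → List Char → List String
  | [], cur => if cur.isEmpty then [] else [String.ofList cur]
  | c :: rest, cur =>
    if c = '.' then
      (if cur.isEmpty then [] else [String.ofList cur]) ++ pvScan rest []
    else if c = ':' ∧ rest.head? = some ':' then
      (if cur.isEmpty then [] else [String.ofList cur]) ++ pvScan rest.tail []
    else
      pvScan rest (cur ++ [c])
termination_by l _ => l.length
decreasing_by all_goals first | (simp [List.length_tail]; omega) | simp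

def split_name_path_py_alt (name_path : String) : List String :=
  pvScan name_path.toList []

-- ===== PRECONDITION & SPEC =====
def Spec_split_name_path_py (name_path : String) (out : List String) : Prop := out = split_name_path_py_alt name_path
instance (name_path : String) (out : List String) : Decidable (Spec_split_name_path_py name_path out) := by unfold Spec_split_name_path_py; infer_instance

-- ===== CLAIM (what is proved, stated in full; the proofs are below) =====
def Claim_equal_split_name_path_py : Prop := ∀ (name_path : String), Dom_split_name_path_py name_path → Spec_split_name_path_py name_path (split_name_path_py name_path)

-- ===== LEMMAS AND PROOFS =====

-- split on "::" keeping empty pieces (accumulator-free form of str.split("::"))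
def pvSp2 : List Char → List (List Char)
  | [] => [[]]
  | c :: rest =>
    if c = ':' ∧ rest.head? = some ':' then [] :: pvSp2 rest.tail
    else (pvSp2 rest).modifyHead (c :: ·)
termination_by l => l.length
decreasing_by all_goals first | (simp [List.length_tail]; omega) | simp

theorem pvSp2_ne_nil (l : List Char) : pvSp2 l ≠ [] := by
  fun_induction pvSp2 l <;> simp_all [List.modifyHead_eq_nil_iff]

-- fuel characterisation of PySem.Chars.splitOn.go for sep = "::"
theorem pvGo2 (fuel : Nat) : ∀ (l cur : List Char) (acc : List (List Char)), l.length < fuel →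
    PySem.Chars.splitOn.go [':', ':'] fuel l cur acc
      = acc.reverse ++ (pvSp2 l).modifyHead (cur.reverse ++ ·) := by
  induction fuel with
  | zero => intro l cur acc h; omega
  | succ fuel ih =>
    intro l cur acc h
    cases l with
    | nil => simp [PySem.Chars.splitOn.go, pvSp2]
    | cons c rest =>
      simp only [PySem.Chars.splitOn.go]
      by_cases hp : c = ':' ∧ rest.head? = some ':'
      · obtain ⟨hc, hr⟩ := hp
        cases rest with
        | nil => simp at hr
        | cons c2 rest2 =>
          simp at hr
          subst hc hr
          have : List.isPrefixOf [':', ':'] (':' :: ':' :: rest2) = true := by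
            simp [List.isPrefixOf]
          rw [this]
          simp only [if_true]
          rw [ih _ [] (cur.reverse :: acc) (by simp at h ⊢; omega)]
          have h2 : pvSp2 (':' :: ':' :: rest2) = [] :: pvSp2 rest2 := by
            rw [pvSp2]; simp
          rw [h2]
          obtain ⟨a, t, ht⟩ := List.exists_cons_of_ne_nil (pvSp2_ne_nil rest2)
          simp [ht]
      · have hnp : List.isPrefixOf [':', ':'] (c :: rest) = false := by
          cases rest with
          | nil => simp [List.isPrefixOf]
          | cons c2 rest2 =>
            simp [List.isPrefixOf]
            intro hc hc2
            exact absurd ⟨hc.symm, by simp [← hc2]⟩ hp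
        rw [hnp]
        simp only [Bool.false_eq_true, if_false]
        rw [ih rest (c :: cur) acc (by simp at h; omega)]
        have h2 : pvSp2 (c :: rest) = (pvSp2 rest).modifyHead (c :: ·) := by
          rw [pvSp2]; simp [hp]
        rw [h2]
        obtain ⟨a, t, ht⟩ := List.exists_cons_of_ne_nil (pvSp2_ne_nil rest)
        simp [ht]

theorem pvSplitOn2_eq (l : List Char) :
    PySem.Chars.splitOn l [':', ':'] = pvSp2 l := by
  rw [PySem.Chars.splitOn, pvGo2 _ _ _ _ (by omega)]
  obtain ⟨a, t, ht⟩ := List.exists_cons_of_ne_nil (pvSp2_ne_nil l)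
  simp [ht]

-- split on "." keeping empty pieces
def pvSp1 : List Char → List (List Char)
  | [] => [[]]
  | c :: rest => if c = '.' then [] :: pvSp1 rest else (pvSp1 rest).modifyHead (c :: ·)

theorem pvSp1_ne_nil (l : List Char) : pvSp1 l ≠ [] := by
  induction l with
  | nil => simp [pvSp1]
  | cons c rest ih =>
    by_cases h : c = '.' <;> simp_all [pvSp1, List.modifyHead_eq_nil_iff]

theorem pvGo1 (fuel : Nat) : ∀ (l cur : List Char) (acc : List (List Char)), l.length < fuel →
    PySem.Chars.splitOn.go ['.'] fuel l cur acc
      = acc.reverse ++ (pvSp1 l).modifyHead (cur.reverse ++ ·) := by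
  induction fuel with
  | zero => intro l cur acc h; omega
  | succ fuel ih =>
    intro l cur acc h
    cases l with
    | nil => simp [PySem.Chars.splitOn.go, pvSp1]
    | cons c rest =>
      simp only [PySem.Chars.splitOn.go]
      by_cases hc : c = '.'
      · subst hc
        have : List.isPrefixOf ['.'] ('.' :: rest) = true := by simp [List.isPrefixOf]
        rw [this]
        simp only [if_true]
        rw [ih _ [] (cur.reverse :: acc) (by simp at h ⊢; omega)]
        have h2 : pvSp1 ('.' :: rest) = [] :: pvSp1 rest := by simp [pvSp1]
        rw [h2]
        obtain ⟨a, t, ht⟩ := List.exists_cons_of_ne_nil (pvSp1_ne_nil rest)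
        simp [ht]
      · have : List.isPrefixOf ['.'] (c :: rest) = false := by
          simp [List.isPrefixOf]; exact fun hx => hc hx.symm
        rw [this]
        simp only [Bool.false_eq_true, if_false]
        rw [ih rest (c :: cur) acc (by simp at h; omega)]
        have h2 : pvSp1 (c :: rest) = (pvSp1 rest).modifyHead (c :: ·) := by simp [pvSp1, hc]
        rw [h2]
        obtain ⟨a, t, ht⟩ := List.exists_cons_of_ne_nil (pvSp1_ne_nil rest)
        simp [ht]

theorem pvSplitOn1_eq (l : List Char) :
    PySem.Chars.splitOn l ['.'] = pvSp1 l := by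
  rw [PySem.Chars.splitOn, pvGo1 _ _ _ _ (by omega)]
  obtain ⟨a, t, ht⟩ := List.exists_cons_of_ne_nil (pvSp1_ne_nil l)
  simp [ht]

-- split on both separators at once, keeping empty pieces
def pvSpB : List Char → List (List Char)
  | [] => [[]]
  | c :: rest =>
    if c = '.' then [] :: pvSpB rest
    else if c = ':' ∧ rest.head? = some ':' then [] :: pvSpB rest.tail
    else (pvSpB rest).modifyHead (c :: ·)
termination_by l => l.length
decreasing_by all_goals first | (simp [List.length_tail]; omega) | simp

theorem pvSpB_ne_nil (l : List Char) : pvSpB l ≠ [] := by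
  fun_induction pvSpB l <;> simp_all [List.modifyHead_eq_nil_iff]

-- re-splitting each "::"-piece on "." is the combined one-pass split
theorem pvFlat_eq (l : List Char) :
    (pvSp2 l).flatMap pvSp1 = pvSpB l := by
  fun_induction pvSpB l with
  | case1 => simp [pvSp2, pvSp1]
  | case2 rest ih =>
    have h2 : pvSp2 ('.' :: rest) = (pvSp2 rest).modifyHead ('.' :: ·) := by
      rw [pvSp2]; simp
    rw [h2]
    obtain ⟨a, t, ht⟩ := List.exists_cons_of_ne_nil (pvSp2_ne_nil rest)
    rw [ht] at ih ⊢
    have h1 : pvSp1 ('.' :: a) = [] :: pvSp1 a := by simp [pvSp1]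
    simp only [List.modifyHead_cons, List.flatMap_cons, h1] at ih ⊢
    simp [← ih]
  | case3 c rest hdot hcol ih =>
    have h2 : pvSp2 (c :: rest) = [] :: pvSp2 rest.tail := by
      rw [pvSp2]; simp [hcol]
    rw [h2]
    simp [pvSp1, ← ih]
  | case4 c rest hdot hcol ih =>
    have h2 : pvSp2 (c :: rest) = (pvSp2 rest).modifyHead (c :: ·) := by
      rw [pvSp2]; simp [hcol]
    rw [h2]
    obtain ⟨a, t, ht⟩ := List.exists_cons_of_ne_nil (pvSp2_ne_nil rest)
    rw [ht] at ih ⊢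
    have h1 : pvSp1 (c :: a) = (pvSp1 a).modifyHead (c :: ·) := by simp [pvSp1, hdot]
    obtain ⟨b, u, hu⟩ := List.exists_cons_of_ne_nil (pvSp1_ne_nil a)
    simp only [List.modifyHead_cons, List.flatMap_cons, h1, hu] at ih ⊢
    simp [← ih, hu]

theorem pvScan_eq_aux (n : Nat) : ∀ (l cur : List Char), l.length ≤ n →
    pvScan l cur =
      (((pvSpB l).modifyHead (cur ++ ·)).filter (fun d => !d.isEmpty)).map String.ofList := by
  induction n with
  | zero =>
    intro l cur h
    have hl : l = [] := by cases l <;> simp_all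
    subst hl
    simp only [pvScan, pvSpB, List.modifyHead_cons]
    by_cases hc : cur.isEmpty
    · simp_all [List.isEmpty_iff, List.filter]
    · have he : cur.isEmpty = false := by simpa using hc
      simp [List.filter, he]
  | succ n ih =>
    intro l cur h
    cases l with
    | nil =>
      simp only [pvScan, pvSpB, List.modifyHead_cons]
      by_cases hc : cur.isEmpty
      · simp_all [List.isEmpty_iff, List.filter]
      · have he : cur.isEmpty = false := by simpa using hc
        simp [List.filter, he]
    | cons c rest =>
      simp only [pvScan]
      by_cases hdot : c = '.'
      · have hB : pvSpB (c :: rest) = [] :: pvSpB rest := by rw [pvSpB]; simp [hdot]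
        rw [hB, hdot, ih rest [] (by simp at h; omega)]
        obtain ⟨a, t, ht⟩ := List.exists_cons_of_ne_nil (pvSpB_ne_nil rest)
        rw [ht]
        by_cases hc : cur.isEmpty <;>
          simp_all [List.isEmpty_iff, List.isEmpty_eq_false_iff, List.filter]
      · by_cases hcol : c = ':' ∧ rest.head? = some ':'
        · have hB : pvSpB (c :: rest) = [] :: pvSpB rest.tail := by
            rw [pvSpB]; simp [hdot, hcol]
          rw [hB]
          have hif : (if c = '.' then (if cur.isEmpty then [] else [String.ofList cur]) ++ pvScan rest []
              else if c = ':' ∧ rest.head? = some ':' then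
                (if cur.isEmpty then [] else [String.ofList cur]) ++ pvScan rest.tail []
              else pvScan rest (cur ++ [c]))
              = (if cur.isEmpty then [] else [String.ofList cur]) ++ pvScan rest.tail [] := by
            simp [hdot, hcol]
          rw [hif, ih rest.tail [] (by simp [List.length_tail] at h ⊢; omega)]
          obtain ⟨a, t, ht⟩ := List.exists_cons_of_ne_nil (pvSpB_ne_nil rest.tail)
          rw [ht]
          by_cases hc : cur.isEmpty <;>
            simp_all [List.isEmpty_iff, List.isEmpty_eq_false_iff, List.filter]
        · have hB : pvSpB (c :: rest) = (pvSpB rest).modifyHead (c :: ·) := by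
            rw [pvSpB]; simp [hdot, hcol]
          rw [hB]
          have hif : (if c = '.' then (if cur.isEmpty then [] else [String.ofList cur]) ++ pvScan rest []
              else if c = ':' ∧ rest.head? = some ':' then
                (if cur.isEmpty then [] else [String.ofList cur]) ++ pvScan rest.tail []
              else pvScan rest (cur ++ [c]))
              = pvScan rest (cur ++ [c]) := by
            simp [hdot, hcol]
          rw [hif, ih rest (cur ++ [c]) (by simp at h; omega)]
          obtain ⟨a, t, ht⟩ := List.exists_cons_of_ne_nil (pvSpB_ne_nil rest)
          rw [ht]
          simp [List.append_assoc]

theorem pvScan_eq (l cur : List Char) :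
    pvScan l cur =
      (((pvSpB l).modifyHead (cur ++ ·)).filter (fun d => !d.isEmpty)).map String.ofList :=
  pvScan_eq_aux l.length l cur le_rfl

-- A's inner loop appends the nonempty dotted pieces
theorem pvInner_eq (xs : List (List Char)) (p : List String) :
    xs.foldl (fun pieces dotted =>
        if dotted.isEmpty then pieces else pieces ++ [String.ofList dotted]) p
      = p ++ (xs.filter (fun d => !d.isEmpty)).map String.ofList := by
  induction xs generalizing p with
  | nil => simp
  | cons a t ih =>
    by_cases ha : a.isEmpty
    · simp_all [List.filter]
    · have he : a.isEmpty = false := by simpa using ha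
      simp only [List.foldl_cons, if_neg (by simpa using ha)]
      rw [ih]
      simp [List.filter, he, List.append_assoc]

theorem pvOuter_eq (xs : List (List Char)) (p : List String) :
    xs.foldl (fun pieces cc =>
        (PySem.Chars.splitOn cc ['.']).foldl
          (fun pieces dotted =>
            if dotted.isEmpty then pieces else pieces ++ [String.ofList dotted])
          pieces) p
      = p ++ xs.flatMap (fun cc => ((pvSp1 cc).filter (fun d => !d.isEmpty)).map String.ofList) := by
  induction xs generalizing p with
  | nil => simp
  | cons a t ih =>
    simp only [List.foldl_cons, List.flatMap_cons]
    rw [pvInner_eq, pvSplitOn1_eq, ih]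
    simp [List.append_assoc]

theorem pvPush_eq (xs : List (List Char)) :
    xs.flatMap (fun cc => ((pvSp1 cc).filter (fun d => !d.isEmpty)).map String.ofList)
      = ((xs.flatMap pvSp1).filter (fun d => !d.isEmpty)).map String.ofList := by
  induction xs with
  | nil => simp
  | cons a t ih => simp [List.filter_append, ih]

theorem pvPorts_eq (s : String) : split_name_path_py s = split_name_path_py_alt s := by
  by_cases hs : s = ""
  · subst hs
    simp [split_name_path_py, split_name_path_py_alt, pvScan]
  · rw [split_name_path_py, if_neg hs]
    rw [pvOuter_eq, pvPush_eq, pvSplitOn2_eq, pvFlat_eq]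
    rw [split_name_path_py_alt, pvScan_eq]
    obtain ⟨a, t, ht⟩ := List.exists_cons_of_ne_nil (pvSpB_ne_nil s.toList)
    simp [ht]

-- ===== VERDICT (by name: the statement is the Claim_ definition above) =====
theorem split_name_path_py_spec : Claim_equal_split_name_path_py := by
  intro name_path _
  exact pvPorts_eq name_path
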